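-- pv_equiv track=rewrite | github.com/baidu-baige/LoongForge | loongforge/data/sft_supervised_utils.py | _build_knapsacks
-- ===== SOURCE A (Python) =====
-- import bisect
-- from typing import TYPE_CHECKING, Union, Dict, List, Any, Sequence, Optional, Tuple
--
-- def _build_knapsacks(numbers: List[int], capacity: int) -> List[List[int]]:
--     """
--     An efficient greedy algorithm with binary search for the knapsack problem.
--     """
--     numbers.sort()
--     knapsacks = []
--
--     while numbers:
--         current_knapsack = []
--         remaining_capacity = capacity
--
--         if numbers[0] > capacity:
--             # no more numbers can be added
--             break
--
--         while remaining_capacity > 0: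
--             index = bisect.bisect_right(numbers, remaining_capacity)
--             if index == 0:
--                 break
--
--             remaining_capacity -= numbers[index - 1]
--             current_knapsack.append(numbers.pop(index - 1))
--
--         knapsacks.append(current_knapsack)
--
--     return knapsacks
-- ===== SOURCE B (Python) =====
-- import bisect
--
-- def _build_knapsacks(numbers, capacity):
--     # Union-find "deleted predecessor" structure over value ranks: parent[q] == q while
--     # rank q is still available, otherwise it points below q (or to -1); find(q) returns
--     # the largest available rank <= q, with path compression.  Taking a number is one
--     # pointer write instead of deleting from a list.
--     # Note: unlike A, this does not mutate the caller's list (same return value).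
--     vals = sorted(numbers)
--     n = len(vals)
--     parent = list(range(n))
--
--     def find(q):
--         root = q
--         while root >= 0 and parent[root] != root:
--             root = parent[root]
--         while q >= 0 and parent[q] != q:
--             parent[q], q = root, parent[q]
--         return root
--
--     m = bisect.bisect_right(vals, capacity)
--     knapsacks = []
--     while find(m - 1) >= 0:
--         remaining = capacity
--         sack = []
--         while remaining > 0:
--             p = find(bisect.bisect_right(vals, remaining) - 1)
--             if p < 0:
--                 break
--             remaining -= vals[p]
--             sack.append(vals[p])
--             parent[p] = p - 1
--         knapsacks.append(sack)
--     return knapsacks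
-- ===== Notes on version B (the rewrite author's own statement) =====
-- stated objective: faster
-- what changed: Replaces A's repeated bisect + pop(index) on a shrinking sorted list with a union-find 'deleted predecessor' structure over value ranks (path-compressed find of the largest available rank <= a bound), so taking a number is a pointer write instead of an O(n) list deletion.
import Mathlib
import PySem

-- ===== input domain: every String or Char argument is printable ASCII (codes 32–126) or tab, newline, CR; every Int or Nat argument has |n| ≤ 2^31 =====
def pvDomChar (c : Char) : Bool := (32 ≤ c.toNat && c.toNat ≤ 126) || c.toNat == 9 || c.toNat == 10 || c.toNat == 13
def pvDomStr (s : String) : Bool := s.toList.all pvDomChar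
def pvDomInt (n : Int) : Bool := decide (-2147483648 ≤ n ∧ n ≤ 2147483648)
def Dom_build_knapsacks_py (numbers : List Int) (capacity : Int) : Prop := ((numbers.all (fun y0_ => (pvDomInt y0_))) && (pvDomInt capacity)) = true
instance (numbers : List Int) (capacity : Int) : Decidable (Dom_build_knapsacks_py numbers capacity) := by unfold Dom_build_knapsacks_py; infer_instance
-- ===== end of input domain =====

-- B replaces A's pop-from-a-sorted-list bookkeeping with a union-find predecessor structure
-- over value ranks (path compression), so no list deletion happens; return value only:
-- Python A sorts and drains `numbers` in place, B does not mutate its argument.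

-- ===== PORT A =====
-- inner `while remaining_capacity > 0` loop of A; fuel = current list length is exact:
-- each iteration that recurses pops one element, and on an empty list the loop body
-- breaks immediately (bisect_right [] = 0), which is what fuel 0 returns.
def pvInnerA : Nat → List Int → Int → List Int → List Int × List Int
  | 0, nums, _, cur => (nums, cur)
  | fuel + 1, nums, rem, cur =>
    if 0 < rem then
      if PySem.List.bisectRight nums rem = 0 then (nums, cur)
      else
        match PySem.List.pop? nums ((PySem.List.bisectRight nums rem : Int) - 1) with
        | some (v, rest) => pvInnerA fuel rest (rem - v) (cur ++ [v])
        | none => (nums, cur)            -- unreachable: bisect_right ≠ 0 ⇒ index in range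
    else (nums, cur)

-- outer `while numbers` loop of A; fuel guards the (diverging) capacity ≤ 0 inputs.
def pvOuterA : Nat → List Int → Int → List (List Int) → List (List Int)
  | 0, _, _, acc => acc
  | fuel + 1, nums, cap, acc =>
    match nums with
    | [] => acc
    | n0 :: _ =>
      if cap < n0 then acc               -- `if numbers[0] > capacity: break`
      else
        let p := pvInnerA nums.length nums cap []
        pvOuterA fuel p.1 cap (acc ++ [p.2])

def build_knapsacks_py (numbers : List Int) (capacity : Int) : List (List Int) :=
  pvOuterA (numbers.length + 1) (PySem.List.sorted numbers (fun x => x) false) capacity []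

-- ===== PORT B =====
-- first loop of B's find: `while root >= 0 and parent[root] != root: root = parent[root]`
-- (fuel n+1 is enough: on every reachable state parent[q] < q when parent[q] ≠ q;
--  the getD index is in range on every reachable state)
def pvFindRoot : Nat → List Int → Int → Int
  | 0, _, q => q
  | fuel + 1, par, q =>
    if q < 0 then q
    else if par.getD q.toNat 0 = q then q
    else pvFindRoot fuel par (par.getD q.toNat 0)

-- second loop of B's find: `while q >= 0 and parent[q] != q: parent[q], q = root, parent[q]`
def pvCompress : Nat → List Int → Int → Int → List Int
  | 0, par, _, _ => par
  | fuel + 1, par, q, root =>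
    if q < 0 then par
    else if par.getD q.toNat 0 = q then par
    else pvCompress fuel (par.set q.toNat root) (par.getD q.toNat 0) root

-- `def find(q): …` — returns the result and the compressed parent list
def pvFind (par : List Int) (q : Int) : Int × List Int :=
  let root := pvFindRoot (par.length + 1) par q
  (root, pvCompress (par.length + 1) par q root)

-- inner `while remaining > 0` loop of B
def pvInnerB : Nat → List Int → List Int → Int → List Int → List Int × List Int
  | 0, _, par, _, sack => (par, sack)
  | fuel + 1, vals, par, rem, sack =>
    if 0 < rem then
      let pr := pvFind par ((PySem.List.bisectRight vals rem : Int) - 1)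
      if pr.1 < 0 then (pr.2, sack)
      else
        let v := vals.getD pr.1.toNat 0            -- vals[p], p always in range here
        pvInnerB fuel vals (pr.2.set pr.1.toNat (pr.1 - 1)) (rem - v) (sack ++ [v])
    else (par, sack)

-- outer `while find(m - 1) >= 0` loop of B (m = bisect_right(vals, capacity), fixed)
def pvOuterB : Nat → List Int → List Int → Int → Nat → List (List Int) → List (List Int)
  | 0, _, _, _, _, acc => acc
  | fuel + 1, vals, par, cap, m, acc =>
    let pr := pvFind par ((m : Int) - 1)
    if pr.1 < 0 then acc
    else
      let q := pvInnerB (vals.length + 1) vals pr.2 cap []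
      pvOuterB fuel vals q.1 cap m (acc ++ [q.2])

def build_knapsacks_py_alt (numbers : List Int) (capacity : Int) : List (List Int) :=
  let vals := PySem.List.sorted numbers (fun x => x) false
  pvOuterB (vals.length + 1) vals (PySem.List.pyRange 0 (vals.length : Int) 1) capacity
    (PySem.List.bisectRight vals capacity) []

-- ===== PRECONDITION & SPEC =====
def Spec_build_knapsacks_py (numbers : List Int) (capacity : Int) (out : List (List Int)) : Prop := out = build_knapsacks_py_alt numbers capacity
instance (numbers : List Int) (capacity : Int) (out : List (List Int)) : Decidable (Spec_build_knapsacks_py numbers capacity out) := by unfold Spec_build_knapsacks_py; infer_instance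

-- ===== CLAIM (what is proved, stated in full; the proofs are below) =====
def Claim_equal_build_knapsacks_py : Prop := ∀ (numbers : List Int) (capacity : Int), Dom_build_knapsacks_py numbers capacity → Spec_build_knapsacks_py numbers capacity (build_knapsacks_py numbers capacity)

-- ===== LEMMAS AND PROOFS =====

lemma pvFindRoot_succ (f : Nat) (par : List Int) (q : Int) :
    pvFindRoot (f + 1) par q
      = if q < 0 then q else if par.getD q.toNat 0 = q then q
        else pvFindRoot f par (par.getD q.toNat 0) := rfl

lemma pvCompress_succ (f : Nat) (par : List Int) (q root : Int) :
    pvCompress (f + 1) par q root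
      = if q < 0 then par else if par.getD q.toNat 0 = q then par
        else pvCompress f (par.set q.toNat root) (par.getD q.toNat 0) root := rfl

-- the multiset of still-available numbers, as A sees it: vals filtered by the alive mask
def pvF : List Int → List Bool → List Int
  | v :: vs, true :: al => v :: pvF vs al
  | _ :: vs, false :: al => pvF vs al
  | _, _ => []

-- largest alive rank strictly below k, as an Int (-1 if none)
def pvMA (al : List Bool) : Nat → Int
  | 0 => -1
  | k + 1 => if al.getD k false then (k : Int) else pvMA al k

-- the union-find invariant: alive entries are self-parented; dead entries point strictly
-- below themselves, skipping only dead ranks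
def pvInv (par : List Int) (al : List Bool) : Prop :=
  par.length = al.length ∧
  ∀ k, k < al.length →
    (-1 ≤ par.getD k 0) ∧
    (if al.getD k false then par.getD k 0 = (k : Int)
     else par.getD k 0 < (k : Int) ∧
       ∀ j : Nat, par.getD k 0 < (j : Int) → j ≤ k → al.getD j false = false)

lemma pvMA_ge (al : List Bool) (t : Nat) : -1 ≤ pvMA al t := by
  induction t with
  | zero => simp [pvMA]
  | succ k ih =>
    by_cases h : al.getD k false
    · simp only [pvMA, h, if_true]; omega
    · simpa only [pvMA, h, Bool.false_eq_true, if_false] using ih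

lemma pvMA_lt (al : List Bool) (t : Nat) : pvMA al t < (t : Int) := by
  induction t with
  | zero => simp [pvMA]
  | succ k ih =>
    by_cases h : al.getD k false
    · simp only [pvMA, h, if_true]; omega
    · simp only [pvMA, h, Bool.false_eq_true, if_false]; omega

lemma pvMA_alive (al : List Bool) (t : Nat) (h : 0 ≤ pvMA al t) :
    al.getD (pvMA al t).toNat false = true ∧ (pvMA al t).toNat < t := by
  induction t with
  | zero => simp [pvMA] at h
  | succ k ih =>
    by_cases hk : al.getD k false
    · simp only [pvMA, hk, if_true]
      rw [Int.toNat_natCast]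
      exact ⟨hk, by omega⟩
    · simp only [pvMA, hk, Bool.false_eq_true, if_false] at h ⊢
      obtain ⟨h1, h2⟩ := ih h
      exact ⟨h1, by omega⟩

lemma pvMA_max (al : List Bool) (t j : Nat) (hj : al.getD j false = true) (hjt : j < t) :
    (j : Int) ≤ pvMA al t := by
  induction t with
  | zero => omega
  | succ k ih =>
    by_cases hk : al.getD k false
    · simp only [pvMA, hk, if_true]; omega
    · have : j ≠ k := by rintro rfl; rw [hj] at hk; simp at hk
      simp only [pvMA, hk, Bool.false_eq_true, if_false]
      exact ih (by omega)

lemma pvMA_dead_gap (al : List Bool) (t j : Nat) (h1 : pvMA al t < (j : Int)) (h2 : j < t) :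
    al.getD j false = false := by
  by_contra h
  have := pvMA_max al t j (by simpa using h) h2
  omega

lemma pvMA_skip (al : List Bool) (a b : Nat) (hab : a ≤ b)
    (h : ∀ j, a ≤ j → j < b → al.getD j false = false) : pvMA al b = pvMA al a := by
  induction b with
  | zero => have ha : a = 0 := by omega
            simp [ha]
  | succ k ih =>
    rcases Nat.lt_or_ge a (k + 1) with hlt | hge
    · have hk : al.getD k false = false := h k (by omega) (by omega)
      simp only [pvMA, hk, Bool.false_eq_true, if_false]
      exact ih (by omega) (fun j hj1 hj2 => h j hj1 (by omega))
    · have : a = k + 1 := by omega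
      simp [this]

-- pvFindRoot returns q itself on a negative q (any positive fuel)
lemma pvFindRoot_neg (fuel : Nat) (par : List Int) (q : Int) (h : q < 0) (hf : 1 ≤ fuel) :
    pvFindRoot fuel par q = q := by
  cases fuel with
  | zero => omega
  | succ f => rw [pvFindRoot_succ, if_pos h]

lemma pvFindRoot_spec (al : List Bool) : ∀ (fuel : Nat) (par : List Int) (q : Int),
    pvInv par al → 0 ≤ q → q < (al.length : Int) → q.toNat + 2 ≤ fuel →
    pvFindRoot fuel par q = pvMA al (q.toNat + 1) := by
  intro fuel
  induction fuel with
  | zero => intro par q _ _ _ h; omega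
  | succ f ih =>
    intro par q hinv hq0 hqlen hfuel
    obtain ⟨hlen, hk⟩ := hinv
    have hqn : q.toNat < al.length := by omega
    obtain ⟨hge, hcase⟩ := hk q.toNat hqn
    by_cases ha : al.getD q.toNat false
    · rw [if_pos ha] at hcase
      have hq : (q.toNat : Int) = q := by omega
      rw [hq] at hcase
      rw [show pvFindRoot (f + 1) par q = q by
        rw [pvFindRoot_succ, if_neg (not_lt.2 hq0), if_pos hcase]]
      simp only [pvMA, ha, if_true]
      omega
    · simp only [ha] at hcase
      obtain ⟨hlt, hgap⟩ := hcase
      set p := par.getD q.toNat 0 with hp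
      have hne : p ≠ q := by omega
      have hstep : pvFindRoot (f + 1) par q = pvFindRoot f par p := by
        rw [pvFindRoot_succ, if_neg (not_lt.2 hq0), if_neg (by rw [← hp]; exact hne), ← hp]
      rw [hstep]
      have hskip : pvMA al (q.toNat + 1) = pvMA al (p + 1).toNat := by
        apply pvMA_skip
        · omega
        · intro j hj1 hj2
          exact hgap j (by omega) (by omega)
      rcases Int.lt_or_le p 0 with hneg | hpos
      · rw [pvFindRoot_neg f par p hneg (by omega), hskip]
        have h0 : (p + 1).toNat = 0 := by omega
        rw [h0]; simp [pvMA]; omega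
      · rw [ih par p ⟨hlen, hk⟩ hpos (by omega) (by omega), hskip]
        congr 1
        omega

lemma pvGetD_set_ne {α : Type} (l : List α) (i j : Nat) (x d : α) (h : i ≠ j) :
    (l.set i x).getD j d = l.getD j d := by
  simp [List.getD, List.getElem?_set_ne h]

lemma pvGetD_set_self {α : Type} (l : List α) (i : Nat) (x d : α) (h : i < l.length) :
    (l.set i x).getD i d = x := by
  simp [List.getD, h]

-- compression rewrites only dead entries, to the (fixed) find result; the invariant survives
lemma pvCompress_inv (al : List Bool) : ∀ (fuel : Nat) (par : List Int) (q root : Int),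
    pvInv par al → q < (al.length : Int) →
    (0 ≤ q → root = pvMA al (q.toNat + 1)) →
    pvInv (pvCompress fuel par q root) al := by
  intro fuel
  induction fuel with
  | zero => intro par q root hinv _ _; exact hinv
  | succ f ih =>
    intro par q root hinv hqlen hroot
    rcases Int.lt_or_le q 0 with hneg | hq0
    · rw [pvCompress_succ, if_pos hneg]; exact hinv
    · obtain ⟨hlen, hk⟩ := hinv
      have hqn : q.toNat < al.length := by omega
      obtain ⟨hge, hcase⟩ := hk q.toNat hqn
      by_cases hpar : par.getD q.toNat 0 = q
      · rw [pvCompress_succ, if_neg (not_lt.2 hq0), if_pos hpar]; exact ⟨hlen, hk⟩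
      · have ha : al.getD q.toNat false = false := by
          by_contra h
          rw [if_pos (by simpa using h)] at hcase
          exact hpar (by omega)
        rw [ha, if_neg (by simp)] at hcase
        obtain ⟨hlt, hgap⟩ := hcase
        set p := par.getD q.toNat 0 with hp
        have hrq := hroot hq0
        have hMAge := pvMA_ge al (q.toNat + 1)
        have hMAlt := pvMA_lt al (q.toNat + 1)
        have hrootlt : root < q := by
          rcases Int.lt_or_le root 0 with h' | h'
          · omega
          · obtain ⟨halive, hlt'⟩ := pvMA_alive al (q.toNat + 1) (hrq ▸ h')
            rw [← hrq] at halive hlt'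
            have hne : root.toNat ≠ q.toNat := by
              intro hcontra
              rw [hcontra, ha] at halive
              simp at halive
            omega
        have hinv' : pvInv (par.set q.toNat root) al := by
          refine ⟨by simpa using hlen, ?_⟩
          intro k hkal
          by_cases hkq : k = q.toNat
          · subst hkq
            rw [pvGetD_set_self par _ _ _ (by omega)]
            refine ⟨by omega, ?_⟩
            rw [ha, if_neg (by simp)]
            refine ⟨by omega, ?_⟩
            intro j hj1 hj2
            rcases Nat.lt_or_ge j (q.toNat + 1) with h' | h'
            · exact pvMA_dead_gap al (q.toNat + 1) j (by omega) (by omega)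
            · have : j = q.toNat := by omega
              rw [this]; exact ha
          · rw [pvGetD_set_ne par _ _ _ _ (fun h => hkq h.symm)]
            exact hk k hkal
        have hstep : pvCompress (f + 1) par q root = pvCompress f (par.set q.toNat root) p root := by
          rw [pvCompress_succ, if_neg (not_lt.2 hq0), if_neg (by rw [← hp]; exact hpar), ← hp]
        rw [hstep]
        apply ih _ p root hinv' (by omega)
        intro hp0
        rw [hrq]
        exact pvMA_skip al (p.toNat + 1) (q.toNat + 1) (by omega)
          (fun j hj1 hj2 => hgap j (by omega) (by omega))

-- find = (largest alive rank ≤ q, a parent list still satisfying the invariant)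
lemma pvFind_spec (al : List Bool) (par : List Int) (q : Int)
    (hinv : pvInv par al) (hq : -1 ≤ q) (hqlen : q < (al.length : Int)) :
    (pvFind par q).1 = pvMA al (q + 1).toNat ∧ pvInv (pvFind par q).2 al := by
  have hlen := hinv.1
  rcases Int.lt_or_le q 0 with hneg | hq0
  · have hq1 : q = -1 := by omega
    subst hq1
    constructor
    · show pvFindRoot (par.length + 1) par (-1) = _
      rw [pvFindRoot_neg _ _ _ (by omega) (by omega)]
      simp [pvMA]
    · show pvInv (pvCompress (par.length + 1) par (-1)
        (pvFindRoot (par.length + 1) par (-1))) al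
      exact pvCompress_inv al (par.length + 1) par (-1) _ hinv (by omega) (by intro h; omega)
  · have hroot : pvFindRoot (par.length + 1) par q = pvMA al (q.toNat + 1) :=
      pvFindRoot_spec al _ par q hinv hq0 hqlen (by omega)
    have htn : (q + 1).toNat = q.toNat + 1 := by omega
    constructor
    · show pvFindRoot (par.length + 1) par q = _
      rw [hroot, htn]
    · show pvInv (pvCompress (par.length + 1) par q _) al
      apply pvCompress_inv al _ _ _ _ hinv (by omega)
      intro _
      exact hroot

-- deleting an alive rank: one pointer write, invariant preserved
lemma pvInv_delete (al : List Bool) (par : List Int) (k : Nat)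
    (hinv : pvInv par al) (ha : al.getD k false = true) (hk : k < al.length) :
    pvInv (par.set k ((k : Int) - 1)) (al.set k false) := by
  obtain ⟨hlen, hinv2⟩ := hinv
  refine ⟨by simpa using hlen, ?_⟩
  intro j hj
  rw [List.length_set] at hj
  by_cases hjk : j = k
  · subst hjk
    rw [pvGetD_set_self par _ _ _ (by omega), pvGetD_set_self al _ _ _ hj]
    refine ⟨by omega, ?_⟩
    rw [if_neg (by simp)]
    refine ⟨by omega, ?_⟩
    intro i hi1 hi2
    have hij : i = j := by omega
    subst hij
    exact pvGetD_set_self al _ _ _ hj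
  · rw [pvGetD_set_ne par _ _ _ _ (fun h => hjk h.symm),
        pvGetD_set_ne al _ _ _ _ (fun h => hjk h.symm)]
    obtain ⟨hge, hcase⟩ := hinv2 j hj
    refine ⟨hge, ?_⟩
    by_cases haj : al.getD j false
    · rw [if_pos haj] at hcase
      rw [if_pos haj]
      exact hcase
    · rw [if_neg haj] at hcase
      rw [if_neg haj]
      obtain ⟨h1, h2⟩ := hcase
      refine ⟨h1, ?_⟩
      intro i hi1 hi2
      by_cases hik : i = k
      · subst hik
        exact pvGetD_set_self al _ _ _ hk
      · rw [pvGetD_set_ne al _ _ _ _ (fun h => hik h.symm)]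
        exact h2 i hi1 hi2

-- ===== pvF lemmas =====
lemma pvF_sublist : ∀ (vs : List Int) (al : List Bool), (pvF vs al).Sublist vs := by
  intro vs
  induction vs with
  | nil => intro al; cases al <;> simp [pvF]
  | cons v vs ih =>
    intro al
    cases al with
    | nil => simp [pvF]
    | cons b al =>
      cases b
      · exact (ih al).cons v
      · exact (ih al).cons₂ v

lemma pvF_all_true : ∀ (vs : List Int), pvF vs (List.replicate vs.length true) = vs := by
  intro vs
  induction vs with
  | nil => rfl
  | cons v vs ih => simpa [pvF, List.replicate_succ] using ih

lemma pvF_append : ∀ (vs ws : List Int) (al bl : List Bool), al.length = vs.length →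
    pvF (vs ++ ws) (al ++ bl) = pvF vs al ++ pvF ws bl := by
  intro vs
  induction vs with
  | nil => intro ws al bl h
           have h0 : al = [] := List.eq_nil_of_length_eq_zero (by simpa using h)
           subst h0
           rfl
  | cons v vs ih =>
    intro ws al bl h
    cases al with
    | nil => simp at h
    | cons b al =>
      cases b <;> simp [pvF, ih ws al bl (by simpa using h)]

lemma pvF_mem : ∀ (vs : List Int) (al : List Bool) (x : Int),
    x ∈ pvF vs al ↔ ∃ k, k < vs.length ∧ al.getD k false = true ∧ vs.getD k 0 = x := by
  intro vs
  induction vs with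
  | nil => intro al x; cases al <;> simp [pvF]
  | cons v vs ih =>
    intro al x
    cases al with
    | nil =>
      simp only [pvF, List.not_mem_nil, false_iff, not_exists]
      rintro k ⟨_, hk, _⟩
      simp [List.getD] at hk
    | cons b al =>
      cases b
      · simp only [pvF, ih]
        constructor
        · rintro ⟨k, h1, h2, h3⟩
          exact ⟨k + 1, by simp; omega, by simpa using h2, by simpa using h3⟩
        · rintro ⟨k, h1, h2, h3⟩
          cases k with
          | zero => simp [List.getD] at h2
          | succ k => exact ⟨k, by simp at h1; omega, by simpa using h2, by simpa using h3⟩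
      · simp only [pvF, List.mem_cons, ih]
        constructor
        · rintro (rfl | ⟨k, h1, h2, h3⟩)
          · exact ⟨0, by simp, by simp [List.getD], by simp [List.getD]⟩
          · exact ⟨k + 1, by simp; omega, by simpa using h2, by simpa using h3⟩
        · rintro ⟨k, h1, h2, h3⟩
          cases k with
          | zero => left; simpa [List.getD] using h3.symm
          | succ k => right; exact ⟨k, by simp at h1; omega, by simpa using h2, by simpa using h3⟩

lemma pvF_length_le (vs : List Int) (al : List Bool) : (pvF vs al).length ≤ vs.length :=
  (pvF_sublist vs al).length_le

lemma pvGetD_drop {α : Type} (l : List α) (t j : Nat) (d : α) :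
    (l.drop t).getD j d = l.getD (t + j) d := by
  simp [List.getD]

-- splitting a list at an index
lemma pvSplit {α : Type} (l : List α) (k : Nat) (hk : k < l.length) (d : α) :
    l = l.take k ++ l.getD k d :: l.drop (k + 1) ∧ (l.take k).length = k := by
  constructor
  · have h1 : l = l.take k ++ l.drop k := (List.take_append_drop _ _).symm
    have h2 : l.drop k = l.getD k d :: l.drop (k + 1) := by
      rw [List.drop_eq_getElem_cons hk]
      congr 1
      simp [List.getD, List.getElem?_eq_getElem hk]
    rw [← h2]; exact h1
  · simp [List.length_take]; omega

lemma pvSet_append {α : Type} (u : List α) (v x : α) (d : List α) :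
    (u ++ v :: d).set u.length x = u ++ x :: d := by
  induction u with
  | nil => rfl
  | cons a t ih => simp [ih]

lemma pvEraseIdx_append (u d : List Int) (v : Int) :
    (u ++ v :: d).eraseIdx u.length = u ++ d := by
  induction u with
  | nil => rfl
  | cons a t ih => simpa using ih

-- bisect characterization via a ≤/> split of the (sorted) list
lemma pvBisect_split (X Y : List Int) (r : Int) (hs : (X ++ Y).Pairwise (· ≤ ·))
    (hX : ∀ x ∈ X, x ≤ r) (hY : ∀ y ∈ Y, r < y) :
    PySem.List.bisectRight (X ++ Y) r = X.length := by
  obtain ⟨hle, hlt, hgt⟩ := PySem.List.bisectRight_spec (X ++ Y) r hs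
  set i := PySem.List.bisectRight (X ++ Y) r with hi
  rcases Nat.lt_trichotomy i X.length with h | h | h
  · exfalso
    have hiX : (X ++ Y)[i]'(by simp; omega) = X[i]'h := List.getElem_append_left h
    have hgt' := hgt i (by simp; omega) (le_refl i)
    rw [hiX] at hgt'
    exact absurd (hX _ (List.getElem_mem h)) (not_le.2 hgt')
  · exact h
  · exfalso
    have hYne : 0 < Y.length := by simp at hle; omega
    have hlen : X.length < (X ++ Y).length := by simp; omega
    have hiY : (X ++ Y)[X.length]'hlen = Y[0]'hYne := by
      rw [List.getElem_append_right (le_refl X.length)]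
      simp
    have hlt' := hlt X.length hlen h
    rw [hiY] at hlt'
    exact absurd hlt' (not_le.2 (hY _ (List.getElem_mem hYne)))

-- ===== the A-step/B-step bridge =====

-- no alive rank fits below m = bisect_right(vals, r)  ⇒  bisect on the filtered list is 0
lemma pvBridge_none (vals : List Int) (al : List Bool) (r : Int)
    (hs : vals.Pairwise (· ≤ ·)) (_hlen : al.length = vals.length)
    (hma : pvMA al (PySem.List.bisectRight vals r) < 0) :
    PySem.List.bisectRight (pvF vals al) r = 0 := by
  obtain ⟨hle, hlt, hgt⟩ := PySem.List.bisectRight_spec vals r hs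
  set m := PySem.List.bisectRight vals r with hm
  have hall : ∀ y ∈ pvF vals al, r < y := by
    intro y hy
    obtain ⟨k, hk1, hk2, hk3⟩ := (pvF_mem vals al y).1 hy
    have hkm : m ≤ k := by
      by_contra h
      have := pvMA_max al m k hk2 (by omega)
      omega
    have hr := hgt k hk1 hkm
    rw [List.getD, List.getElem?_eq_getElem hk1, Option.getD_some] at hk3
    omega
  have := pvBisect_split [] (pvF vals al) r
    (by simpa using (hs.sublist (pvF_sublist vals al)))
    (by simp) (by simpa using hall)
  simpa using this

-- an alive rank fits ⇒ A pops exactly vals[k*] (where k* = largest alive rank < m) and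
-- the popped list is vals filtered by the mask with k* switched off
lemma pvBridge_some (vals : List Int) (al : List Bool) (r : Int)
    (hs : vals.Pairwise (· ≤ ·)) (hlen : al.length = vals.length)
    (hma : 0 ≤ pvMA al (PySem.List.bisectRight vals r)) :
    PySem.List.bisectRight (pvF vals al) r ≠ 0 ∧
    PySem.List.pop? (pvF vals al) ((PySem.List.bisectRight (pvF vals al) r : Int) - 1)
      = some (vals.getD (pvMA al (PySem.List.bisectRight vals r)).toNat 0,
              pvF vals (al.set (pvMA al (PySem.List.bisectRight vals r)).toNat false)) := by
  obtain ⟨hle, hlt, hgt⟩ := PySem.List.bisectRight_spec vals r hs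
  set m := PySem.List.bisectRight vals r with hm
  set k := (pvMA al m).toNat with hkdef
  obtain ⟨halive, hkm⟩ := pvMA_alive al m hma
  rw [← hkdef] at halive hkm
  have hkl : k < al.length := by omega
  have hkv : k < vals.length := by omega
  obtain ⟨hveq, hvlen⟩ := pvSplit vals k hkv 0
  obtain ⟨haeq, halen⟩ := pvSplit al k hkl false
  rw [halive] at haeq
  set v1 := vals.take k with hv1
  set v2 := vals.drop (k + 1) with hv2
  set a1 := al.take k with ha1
  set a2 := al.drop (k + 1) with ha2
  set v := vals.getD k 0 with hvdef
  have ha1len : a1.length = v1.length := by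
    rw [ha1, hv1]; simp [List.length_take]; omega
  have hFsplit : pvF vals al = pvF v1 a1 ++ v :: pvF v2 a2 := by
    conv_lhs => rw [hveq, haeq]
    rw [pvF_append v1 (v :: v2) a1 (true :: a2) ha1len]
    rfl
  set X := pvF v1 a1 with hX
  set Y := pvF v2 a2 with hY
  have hvk : v = vals[k] := by
    rw [hvdef, List.getD, List.getElem?_eq_getElem hkv, Option.getD_some]
  have hvkr : v ≤ r := by rw [hvk]; exact hlt k hkv hkm
  have hpair := List.pairwise_iff_getElem.1 hs
  -- everything in X ++ [v] is ≤ r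
  have hXle : ∀ x ∈ X ++ [v], x ≤ r := by
    intro x hx
    rcases List.mem_append.1 hx with hx | hx
    · have hxv1 : x ∈ v1 := (pvF_sublist v1 a1).mem hx
      obtain ⟨j, hj, rfl⟩ := List.mem_iff_getElem.1 hxv1
      have hjk : j < k := by rw [hv1] at hj; simp [List.length_take] at hj; omega
      have hvt : v1[j] = vals[j]'(by omega) := List.getElem_take
      rw [hvt]
      have := hpair j k (by omega) (by omega) hjk
      omega
    · simp only [List.mem_singleton] at hx
      rw [hx]; exact hvkr
  -- everything in Y is > r
  have hYgt : ∀ y ∈ Y, r < y := by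
    intro y hy
    obtain ⟨j, hj1, hj2, hj3⟩ := (pvF_mem v2 a2 y).1 hy
    have hjg : al.getD (k + 1 + j) false = true := by
      rw [← hj2, ha2, pvGetD_drop]
    have hjlen : k + 1 + j < vals.length := by
      rw [hv2] at hj1; simp [List.length_drop] at hj1; omega
    have hgm : m ≤ k + 1 + j := by
      by_contra h
      have := pvMA_max al m (k + 1 + j) hjg (by omega)
      omega
    have hyv : y = vals[k + 1 + j] := by
      rw [← hj3, hv2, pvGetD_drop, List.getD, List.getElem?_eq_getElem hjlen, Option.getD_some]
    rw [hyv]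
    exact hgt (k + 1 + j) hjlen hgm
  -- bisect on the filtered list
  have hFs : (X ++ [v] ++ Y).Pairwise (· ≤ ·) := by
    have : (X ++ [v] ++ Y) = pvF vals al := by rw [hFsplit]; simp
    rw [this]
    exact hs.sublist (pvF_sublist vals al)
  have hbis : PySem.List.bisectRight (pvF vals al) r = X.length + 1 := by
    have h1 : pvF vals al = (X ++ [v]) ++ Y := by rw [hFsplit]; simp
    rw [h1, pvBisect_split (X ++ [v]) Y r (by simpa using hFs) hXle hYgt]
    simp
  refine ⟨by omega, ?_⟩
  rw [hbis]
  have hcast : ((X.length + 1 : Nat) : Int) - 1 = ((X.length : Nat) : Int) := by push_cast; ring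
  rw [hcast]
  have hlenF : X.length < (pvF vals al).length := by rw [hFsplit]; simp
  rw [PySem.List.pop?_natCast (pvF vals al) X.length hlenF]
  have hgetF : (pvF vals al)[X.length]'hlenF = v := by
    have h1 : pvF vals al = X ++ v :: Y := hFsplit
    rw [List.getElem_of_eq h1 hlenF]
    rw [List.getElem_append_right (le_refl X.length)]
    simp
  have heraseF : (pvF vals al).eraseIdx X.length = pvF vals (al.set k false) := by
    have hset : al.set k false = a1 ++ false :: a2 := by
      conv_lhs => rw [haeq]
      rw [← halen, pvSet_append]
    rw [hset]
    conv_lhs => rw [hFsplit]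
    rw [pvEraseIdx_append]
    conv_rhs => rw [hveq]
    rw [pvF_append v1 (v :: v2) a1 (false :: a2) ha1len]
    rfl
  rw [hgetF, heraseF, hvdef]

-- evaluation of pvInnerA when the loop stops at once (any fuel)
lemma pvInnerA_stop (fA : Nat) (nums : List Int) (rem : Int) (cur : List Int)
    (h : ¬ 0 < rem ∨ PySem.List.bisectRight nums rem = 0) :
    pvInnerA fA nums rem cur = (nums, cur) := by
  cases fA with
  | zero => rfl
  | succ g =>
    rcases h with h | h
    · simp [pvInnerA, h]
    · by_cases hrem : 0 < rem
      · simp [pvInnerA, hrem, h]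
      · simp [pvInnerA, hrem]

-- the two inner loops agree: B's state is the alive mask, A's is the filtered list
lemma pvInner_corr (vals : List Int) (hs : vals.Pairwise (· ≤ ·)) :
    ∀ (fB fA : Nat) (al : List Bool) (par : List Int) (rem : Int) (cur : List Int),
    pvInv par al → al.length = vals.length →
    (pvF vals al).length ≤ fA → (pvF vals al).length ≤ fB →
    ∃ al' par',
      pvInnerB fB vals par rem cur = (par', (pvInnerA fA (pvF vals al) rem cur).2)
      ∧ (pvInnerA fA (pvF vals al) rem cur).1 = pvF vals al'
      ∧ pvInv par' al' ∧ al'.length = vals.length := by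
  intro fB
  induction fB with
  | zero =>
    intro fA al par rem cur hinv hlen hfA hfB
    have hF : pvF vals al = [] := List.eq_nil_of_length_eq_zero (by omega)
    have hbis : PySem.List.bisectRight ([] : List Int) rem = 0 := by
      simp
    have hstop := pvInnerA_stop fA [] rem cur (Or.inr hbis)
    refine ⟨al, par, ?_, ?_, hinv, hlen⟩
    · rw [hF, hstop]
      rfl
    · rw [hF, hstop]
  | succ f ih =>
    intro fA al par rem cur hinv hlen hfA hfB
    by_cases hrem : 0 < rem
    · have hm := (PySem.List.bisectRight_spec vals rem hs).1
      set m := PySem.List.bisectRight vals rem with hmdef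
      have hb1 : -1 ≤ (m : Int) - 1 := by omega
      have hb2 : (m : Int) - 1 < (al.length : Int) := by omega
      obtain ⟨hfind1, hfind2⟩ := pvFind_spec al par ((m : Int) - 1) hinv hb1 hb2
      have htn : ((m : Int) - 1 + 1).toNat = m := by omega
      rw [htn] at hfind1
      rcases Int.lt_or_le (pvMA al m) 0 with hma | hma
      · -- nothing fits: both loops break
        have hbis0 := pvBridge_none vals al rem hs hlen hma
        have hBstep : pvInnerB (f + 1) vals par rem cur
            = ((pvFind par ((m : Int) - 1)).2, cur) := by
          simp only [pvInnerB, if_pos hrem, ← hmdef]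
          rw [if_pos (by rw [hfind1]; exact hma)]
        refine ⟨al, (pvFind par ((m : Int) - 1)).2, ?_, ?_, hfind2, hlen⟩
        · rw [hBstep, pvInnerA_stop fA _ rem cur (Or.inr hbis0)]
        · rw [pvInnerA_stop fA _ rem cur (Or.inr hbis0)]
      · -- a number is taken
        obtain ⟨hbne, hpop⟩ := pvBridge_some vals al rem hs hlen hma
        set k := (pvMA al m).toNat with hkdef
        have halive : al.getD k false = true := (pvMA_alive al m hma).1
        have hkl : k < al.length := by
          have := (pvMA_alive al m hma).2
          omega
        set v := vals.getD k 0 with hvdef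
        -- A's step
        have hFlen : 1 ≤ (pvF vals al).length := by
          have := (PySem.List.bisectRight_spec (pvF vals al) rem
            (hs.sublist (pvF_sublist vals al))).1
          omega
        obtain ⟨g, rfl⟩ : ∃ g, fA = g + 1 := ⟨fA - 1, by omega⟩
        have hAstep : pvInnerA (g + 1) (pvF vals al) rem cur
            = pvInnerA g (pvF vals (al.set k false)) (rem - v) (cur ++ [v]) := by
          simp only [pvInnerA, if_pos hrem, if_neg hbne, hpop]
        -- B's step
        have hfk : (pvFind par ((m : Int) - 1)).1 = (k : Int) := by
          rw [hfind1]; omega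
        have hBstep : pvInnerB (f + 1) vals par rem cur
            = pvInnerB f vals ((pvFind par ((m : Int) - 1)).2.set k ((k : Int) - 1))
                (rem - v) (cur ++ [v]) := by
          simp only [pvInnerB, if_pos hrem, ← hmdef]
          rw [if_neg (by rw [hfk]; omega)]
          rw [hfk]
          simp only [Int.toNat_natCast]
          rw [← hvdef]
        -- new state invariant
        have hinv' : pvInv ((pvFind par ((m : Int) - 1)).2.set k ((k : Int) - 1)) (al.set k false) :=
          pvInv_delete al _ k hfind2 halive hkl
        have hlen' : (al.set k false).length = vals.length := by simpa using hlen
        have hFlen' : (pvF vals (al.set k false)).length + 1 = (pvF vals al).length := by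
          have := PySem.List.length_of_pop?_eq_some _ hpop
          simpa using this
        obtain ⟨al', par', h1, h2, h3, h4⟩ := ih g (al.set k false)
          ((pvFind par ((m : Int) - 1)).2.set k ((k : Int) - 1)) (rem - v) (cur ++ [v])
          hinv' hlen' (by omega) (by omega)
        refine ⟨al', par', ?_, ?_, h3, h4⟩
        · rw [hBstep, hAstep, h1]
        · rw [hAstep, h2]
    · -- remaining ≤ 0: both loops skip
      refine ⟨al, par, ?_, ?_, hinv, hlen⟩
      · rw [pvInnerA_stop fA _ rem cur (Or.inl hrem)]
        simp [pvInnerB, hrem]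
      · rw [pvInnerA_stop fA _ rem cur (Or.inl hrem)]

-- the two outer loops agree
lemma pvOuter_corr (vals : List Int) (cap : Int) (hs : vals.Pairwise (· ≤ ·)) :
    ∀ (f : Nat) (al : List Bool) (par : List Int) (acc : List (List Int)),
    pvInv par al → al.length = vals.length →
    pvOuterB f vals par cap (PySem.List.bisectRight vals cap) acc
      = pvOuterA f (pvF vals al) cap acc := by
  intro f
  induction f with
  | zero => intro al par acc _ _; rfl
  | succ f ih =>
    intro al par acc hinv hlen
    obtain ⟨hle, hlt, hgt⟩ := PySem.List.bisectRight_spec vals cap hs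
    set m := PySem.List.bisectRight vals cap with hmdef
    have hb1 : -1 ≤ (m : Int) - 1 := by omega
    have hb2 : (m : Int) - 1 < (al.length : Int) := by omega
    obtain ⟨hfind1, hfind2⟩ := pvFind_spec al par ((m : Int) - 1) hinv hb1 hb2
    have htn : ((m : Int) - 1 + 1).toNat = m := by omega
    rw [htn] at hfind1
    rcases Int.lt_or_le (pvMA al m) 0 with hma | hma
    · -- loop ends on both sides
      have hBstep : pvOuterB (f + 1) vals par cap m acc = acc := by
        simp only [pvOuterB]
        rw [if_pos (by rw [hfind1]; exact hma)]
      rw [hBstep]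
      rcases hF : pvF vals al with _ | ⟨n0, t⟩
      · rfl
      · have hn0 : cap < n0 := by
          by_contra h
          obtain ⟨j, hj1, hj2, hj3⟩ := (pvF_mem vals al n0).1 (by rw [hF]; simp)
          have hjm : j < m := by
            by_contra h'
            have := hgt j hj1 (by omega)
            rw [List.getD, List.getElem?_eq_getElem hj1, Option.getD_some] at hj3
            -- n0 ≤ cap but vals[j] = n0 > cap
            have hpair := List.pairwise_iff_getElem.1 hs
            omega
          have := pvMA_max al m j hj2 hjm
          omega
        simp [pvOuterA, hn0]
    · -- loop body runs on both sides
      set k := (pvMA al m).toNat with hkdef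
      have halive : al.getD k false = true := (pvMA_alive al m hma).1
      have hkm : k < m := (pvMA_alive al m hma).2
      have hkv : k < vals.length := by omega
      have hvmem : vals.getD k 0 ∈ pvF vals al := by
        rw [pvF_mem]
        exact ⟨k, hkv, halive, rfl⟩
      rcases hF : pvF vals al with _ | ⟨n0, t⟩
      · rw [hF] at hvmem; simp at hvmem
      · have hvcap : vals.getD k 0 ≤ cap := by
          rw [List.getD, List.getElem?_eq_getElem hkv, Option.getD_some]
          exact hlt k hkv hkm
        have hn0le : n0 ≤ cap := by
          rw [hF] at hvmem
          have hsF : (pvF vals al).Pairwise (· ≤ ·) := hs.sublist (pvF_sublist vals al)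
          rw [hF] at hsF
          rcases List.mem_cons.1 hvmem with h | h
          · omega
          · have := (List.pairwise_cons.1 hsF).1 _ h
            omega
        -- unfold one step of B
        obtain ⟨al', par', hB, hA, hinv', hlen'⟩ := pvInner_corr vals hs
          (vals.length + 1) (pvF vals al).length al (pvFind par ((m : Int) - 1)).2 cap []
          hfind2 hlen (le_refl _) (by have := pvF_length_le vals al; omega)
        have hBstep : pvOuterB (f + 1) vals par cap m acc
            = pvOuterB f vals par' cap m
                (acc ++ [(pvInnerA (pvF vals al).length (pvF vals al) cap []).2]) := by
          simp only [pvOuterB]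
          rw [if_neg (by rw [hfind1]; omega)]
          rw [hB]
        have hAstep : pvOuterA (f + 1) (n0 :: t) cap acc
            = pvOuterA f (pvF vals al') cap
                (acc ++ [(pvInnerA (pvF vals al).length (pvF vals al) cap []).2]) := by
          simp only [pvOuterA]
          rw [if_neg (not_lt.2 hn0le), ← hF, hA]
        rw [hBstep, hAstep]
        exact ih al' par' _ hinv' hlen'

-- the initial state: everything alive, parent[k] = k
lemma pvInit (n : Nat) :
    pvInv (PySem.List.pyRange 0 (n : Int) 1) (List.replicate n true) := by
  have hlen : (PySem.List.pyRange 0 (n : Int) 1).length = n := by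
    rw [PySem.List.length_pyRange_one]; omega
  refine ⟨by simp [hlen], ?_⟩
  intro k hk
  rw [List.length_replicate] at hk
  have hget : (PySem.List.pyRange 0 (n : Int) 1).getD k 0 = (k : Int) := by
    have hk' : k < (PySem.List.pyRange 0 (n : Int) 1).length := by omega
    rw [List.getD, List.getElem?_eq_getElem hk', Option.getD_some,
        PySem.List.getElem_pyRange_one]
    omega
  have halive : (List.replicate n true).getD k false = true := by
    simp [List.getD, hk]
  rw [hget, halive]
  exact ⟨by omega, by simp⟩

-- ===== VERDICT (by name: the statement is the Claim_ definition above) =====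
theorem build_knapsacks_py_spec : Claim_equal_build_knapsacks_py := by
  intro numbers capacity _
  unfold Spec_build_knapsacks_py build_knapsacks_py build_knapsacks_py_alt
  set vals := PySem.List.sorted numbers (fun x => x) false with hvals
  have hs : vals.Pairwise (· ≤ ·) := by
    simpa using PySem.List.sorted_pairwise numbers (fun x => x)
  have hlen : vals.length = numbers.length := PySem.List.length_sorted numbers (fun x => x) false
  have hcorr := pvOuter_corr vals capacity hs (vals.length + 1)
    (List.replicate vals.length true) (PySem.List.pyRange 0 (vals.length : Int) 1) []
    (pvInit vals.length) (by simp)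
  rw [pvF_all_true] at hcorr
  rw [← hlen]
  exact hcorr.symm
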